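-- pv_equiv track=rewrite | github.com/zeenayouhan/jira-figma-analyzer | figma_integration.py | _extract_design_tokens
-- ===== SOURCE A (Python) =====
-- from typing import Dict, List, Optional, Any, Tuple
--
-- def _extract_design_tokens(styles: Dict) -> Dict[str, Any]:
--     """Extract design tokens (colors, typography, etc.) from Figma styles."""
--     tokens = {
--         'colors': [],
--         'typography': [],
--         'spacing': [],
--         'effects': []
--     }
--
--     for style_id, style_data in styles.items():
--         style_type = style_data.get('styleType', '').lower()
--
--         if style_type == 'fill':
--             tokens['colors'].append({
--                 'name': style_data.get('name', ''),
--                 'description': style_data.get('description', '')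
--             })
--         elif style_type == 'text':
--             tokens['typography'].append({
--                 'name': style_data.get('name', ''),
--                 'description': style_data.get('description', '')
--             })
--         elif style_type == 'effect':
--             tokens['effects'].append({
--                 'name': style_data.get('name', ''),
--                 'description': style_data.get('description', '')
--             })
--
--     return tokens
-- ===== SOURCE B (Python) =====
-- def _extract_design_tokens(styles):
--     """Extract design tokens (colors, typography, etc.) from Figma styles."""
--     def bucket(style_type):
--         return [{'name': s.get('name', ''), 'description': s.get('description', '')}
--                 for s in styles.values()
--                 if s.get('styleType', '').lower() == style_type]
--
--     return {
--         'colors': bucket('fill'),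
--         'typography': bucket('text'),
--         'spacing': [],
--         'effects': bucket('effect')
--     }
-- ===== Notes on version B (the rewrite author's own statement) =====
-- stated objective: simpler
-- what changed: Replaced A's single branching pass that mutates a dict of buckets with a dict literal of per-category list comprehensions, each filtering styles.values() on the lowercased styleType; 'spacing' is the literal empty list.
import Mathlib
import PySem

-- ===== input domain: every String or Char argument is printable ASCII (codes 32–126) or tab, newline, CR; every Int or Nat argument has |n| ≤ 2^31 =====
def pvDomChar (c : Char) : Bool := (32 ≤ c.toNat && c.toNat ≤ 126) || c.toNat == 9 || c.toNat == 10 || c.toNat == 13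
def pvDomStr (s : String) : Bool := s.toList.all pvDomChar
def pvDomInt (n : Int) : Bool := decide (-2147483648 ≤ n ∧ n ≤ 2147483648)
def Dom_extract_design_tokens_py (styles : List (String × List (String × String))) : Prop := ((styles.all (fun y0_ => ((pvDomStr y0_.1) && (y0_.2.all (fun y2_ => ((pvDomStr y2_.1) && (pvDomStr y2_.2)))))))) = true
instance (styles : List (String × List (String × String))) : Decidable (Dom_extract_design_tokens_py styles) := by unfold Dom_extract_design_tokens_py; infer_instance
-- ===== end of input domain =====

-- B replaces A's single branching pass mutating a dict of buckets by a dict of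
-- per-category filtered comprehensions (objective: simpler; return value only).

-- shared Python-dict lookup style_data.get(k, dflt) (first match, insertion order)
def pvGet (d : List (String × String)) (k : String) (dflt : String) : String :=
  PySem.Dict.getD (PySem.Dict.mk d) k dflt

-- ===== PORT A =====
def extract_design_tokens_py (styles : List (String × List (String × String))) : List (String × List (List (String × String))) :=
  let tokens : PySem.Dict String (List (List (String × String))) :=
    PySem.Dict.mk [("colors", []), ("typography", []), ("spacing", []), ("effects", [])]
  let tokens := styles.foldl (fun tokens sd =>
    let style_type := PySem.Str.lower (pvGet sd.2 "styleType" "")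
    if style_type == "fill" then
      tokens.modify "colors" [] (fun l => l ++
        [[("name", pvGet sd.2 "name" ""), ("description", pvGet sd.2 "description" "")]])
    else if style_type == "text" then
      tokens.modify "typography" [] (fun l => l ++
        [[("name", pvGet sd.2 "name" ""), ("description", pvGet sd.2 "description" "")]])
    else if style_type == "effect" then
      tokens.modify "effects" [] (fun l => l ++
        [[("name", pvGet sd.2 "name" ""), ("description", pvGet sd.2 "description" "")]])
    else tokens) tokens
  tokens.items

-- ===== PORT B =====
def pvBucket (styles : List (String × List (String × String))) (style_type : String) : List (List (String × String)) :=
  ((styles.map Prod.snd).filter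
      (fun s => PySem.Str.lower (pvGet s "styleType" "") == style_type)).map
    (fun s => [("name", pvGet s "name" ""), ("description", pvGet s "description" "")])

def extract_design_tokens_py_alt (styles : List (String × List (String × String))) : List (String × List (List (String × String))) :=
  [("colors", pvBucket styles "fill"),
   ("typography", pvBucket styles "text"),
   ("spacing", []),
   ("effects", pvBucket styles "effect")]

-- ===== PRECONDITION & SPEC =====
def Spec_extract_design_tokens_py (styles : List (String × List (String × String))) (out : List (String × List (List (String × String)))) : Prop := out = extract_design_tokens_py_alt styles
instance (styles : List (String × List (String × String))) (out : List (String × List (List (String × String)))) : Decidable (Spec_extract_design_tokens_py styles out) := by unfold Spec_extract_design_tokens_py; infer_instance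

-- ===== CLAIM (what is proved, stated in full; the proofs are below) =====
def Claim_equal_extract_design_tokens_py : Prop := ∀ (styles : List (String × List (String × String))), Dom_extract_design_tokens_py styles → Spec_extract_design_tokens_py styles (extract_design_tokens_py styles)

-- ===== LEMMAS AND PROOFS =====

lemma pv_loop (styles : List (String × List (String × String)))
    (c t e : List (List (String × String))) :
    (styles.foldl (fun tokens sd =>
      let style_type := PySem.Str.lower (pvGet sd.2 "styleType" "")
      if style_type == "fill" then
        tokens.modify "colors" [] (fun l => l ++
          [[("name", pvGet sd.2 "name" ""), ("description", pvGet sd.2 "description" "")]])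
      else if style_type == "text" then
        tokens.modify "typography" [] (fun l => l ++
          [[("name", pvGet sd.2 "name" ""), ("description", pvGet sd.2 "description" "")]])
      else if style_type == "effect" then
        tokens.modify "effects" [] (fun l => l ++
          [[("name", pvGet sd.2 "name" ""), ("description", pvGet sd.2 "description" "")]])
      else tokens)
      (PySem.Dict.mk [("colors", c), ("typography", t), ("spacing", []), ("effects", e)])).items
    = [("colors", c ++ pvBucket styles "fill"),
       ("typography", t ++ pvBucket styles "text"),
       ("spacing", []),
       ("effects", e ++ pvBucket styles "effect")] := by
  induction styles generalizing c t e with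
  | nil => simp [pvBucket]
  | cons sd rest ih =>
    simp only [List.foldl_cons]
    by_cases h1 : PySem.Str.lower (pvGet sd.2 "styleType" "") = "fill"
    · simp only [h1]
      rw [show (PySem.Dict.mk [("colors", c), ("typography", t), ("spacing", ([] : List (List (String × String)))), ("effects", e)]).modify "colors" []
            (fun l => l ++ [[("name", pvGet sd.2 "name" ""), ("description", pvGet sd.2 "description" "")]])
          = PySem.Dict.mk [("colors", c ++ [[("name", pvGet sd.2 "name" ""), ("description", pvGet sd.2 "description" "")]]), ("typography", t), ("spacing", []), ("effects", e)]
        from by simp [PySem.Dict.modify, PySem.Dict.getD, PySem.Dict.get?_mk_cons, PySem.Dict.insert, PySem.Dict.contains]]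
      simp only [beq_self_eq_true, if_true, ih]
      simp [pvBucket, h1]
    · by_cases h2 : PySem.Str.lower (pvGet sd.2 "styleType" "") = "text"
      · simp only [h2]
        rw [show (PySem.Dict.mk [("colors", c), ("typography", t), ("spacing", ([] : List (List (String × String)))), ("effects", e)]).modify "typography" []
              (fun l => l ++ [[("name", pvGet sd.2 "name" ""), ("description", pvGet sd.2 "description" "")]])
            = PySem.Dict.mk [("colors", c), ("typography", t ++ [[("name", pvGet sd.2 "name" ""), ("description", pvGet sd.2 "description" "")]]), ("spacing", []), ("effects", e)]
          from by simp [PySem.Dict.modify, PySem.Dict.getD, PySem.Dict.get?_mk_cons, PySem.Dict.insert, PySem.Dict.contains]]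
        simp only [beq_self_eq_true, if_true, if_neg (by simp [h2] : ¬ (("text" : String) == "fill") = true), ih]
        simp [pvBucket, h1, h2]
      · by_cases h3 : PySem.Str.lower (pvGet sd.2 "styleType" "") = "effect"
        · simp only [h3]
          rw [show (PySem.Dict.mk [("colors", c), ("typography", t), ("spacing", ([] : List (List (String × String)))), ("effects", e)]).modify "effects" []
                (fun l => l ++ [[("name", pvGet sd.2 "name" ""), ("description", pvGet sd.2 "description" "")]])
              = PySem.Dict.mk [("colors", c), ("typography", t), ("spacing", []), ("effects", e ++ [[("name", pvGet sd.2 "name" ""), ("description", pvGet sd.2 "description" "")]])]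
            from by simp [PySem.Dict.modify, PySem.Dict.getD, PySem.Dict.get?_mk_cons, PySem.Dict.insert, PySem.Dict.contains]]
          simp only [show (("effect" : String) == "fill") = false from rfl,
                     show (("effect" : String) == "text") = false from rfl,
                     Bool.false_eq_true, if_false, beq_self_eq_true, if_true, ih]
          simp [pvBucket, h3]
        · have e1 : (PySem.Str.lower (pvGet sd.2 "styleType" "") == "fill") = false := by
            simp [h1]
          have e2 : (PySem.Str.lower (pvGet sd.2 "styleType" "") == "text") = false := by
            simp [h2]
          have e3 : (PySem.Str.lower (pvGet sd.2 "styleType" "") == "effect") = false := by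
            simp [h3]
          simp only [e1, e2, e3, Bool.false_eq_true, if_false, ih]
          simp [pvBucket, h1, h2, h3]

-- ===== VERDICT (by name: the statement is the Claim_ definition above) =====
theorem extract_design_tokens_py_spec : Claim_equal_extract_design_tokens_py := by
  intro styles _hdom
  unfold Spec_extract_design_tokens_py extract_design_tokens_py extract_design_tokens_py_alt
  simpa using pv_loop styles [] [] []
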